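-- pv_equiv track=rewrite | github.com/VHollund/AoC2020 | Day11/main.py | check_r
-- ===== SOURCE A (Python) =====
-- def check_r(l, y, x):
--     if x==len(l)+1:
--         return True
--     for z in range(x+1, len(l)):
--         if l[z] == "#":
--             return False
--         if l[z] == "L":
--             return True
--     return True
-- ===== SOURCE B (Python) =====
-- def _pos(t, c):
--     # index of the first occurrence of c in t, or -1 if absent
--     return t.index(c) if c in t else -1
--
-- def check_r(l, y, x):
--     # two staged searches: positions of the nearest '#' and 'L' right of x, then compare
--     tail = l[x+1:]
--     h = _pos(tail, "#")
--     s = _pos(tail, "L")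
--     return h == -1 or (s != -1 and s < h)
-- ===== Notes on version B (the rewrite author's own statement) =====
-- stated objective: alternative
-- what changed: A's single forward scan with early returns is replaced by two staged library searches: the indices of the first '#' and the first 'L' in the slice right of x are computed independently (list.index / -1 if absent) and the verdict is an arithmetic comparison of the two indices; the redundant x==len(l)+1 guard is dropped.
-- intended difference: For x <= -2 with -len(l) <= x+1, A's negative indices wrap around and, when every cell right of x is floor, it rescans the whole row from the start and returns False if the row's first non-floor cell is '#'; B searches only the slice right of x and returns True, the intended answer to 'is no occupied seat the nearest seat to the right'. — e.g. on check_r(["#", "."], 0, -2): A returns false, B returns true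
import Mathlib
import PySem

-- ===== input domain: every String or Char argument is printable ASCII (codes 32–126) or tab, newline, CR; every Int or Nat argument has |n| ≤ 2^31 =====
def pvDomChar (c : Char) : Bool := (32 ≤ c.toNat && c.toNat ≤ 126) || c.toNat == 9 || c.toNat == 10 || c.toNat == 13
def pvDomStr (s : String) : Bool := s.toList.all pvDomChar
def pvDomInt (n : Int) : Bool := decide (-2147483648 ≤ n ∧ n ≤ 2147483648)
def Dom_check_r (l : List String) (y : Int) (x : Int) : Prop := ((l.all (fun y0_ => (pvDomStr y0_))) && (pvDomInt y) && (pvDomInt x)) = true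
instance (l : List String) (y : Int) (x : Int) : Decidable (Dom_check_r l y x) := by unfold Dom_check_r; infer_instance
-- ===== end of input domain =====

-- B replaces A's forward scan with two staged searches: the indices of the first '#' and the first 'L' right of x are computed
-- independently and the verdict is a comparison of the two indices (objective: alternative).

-- ===== PORT A =====
-- the for-z-in-range loop of A: returns at the first "#" or "L"; none = IndexError (excluded by Pre_)
def checkRLoop (l : List String) : List Int → Bool
  | [] => true
  | z :: zs =>
    match PySem.List.pyGet? l z with
    | none => true
    | some s => if s == "#" then false else if s == "L" then true else checkRLoop l zs

def check_r (l : List String) (y : Int) (x : Int) : Bool :=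
  if x = (l.length : Int) + 1 then true
  else checkRLoop l (PySem.List.pyRange (x + 1) (l.length : Int))

-- ===== PORT B =====
-- _pos(t, c) of Source B: t.index(c) if c in t else -1
def firstNF (t : List String) (c : String) : Int :=
  if t.contains c then (((PySem.List.index? t c).getD 0 : Nat) : Int) else -1

def check_r_alt (l : List String) (y : Int) (x : Int) : Bool :=
  let tail := PySem.List.slice l (some (x + 1)) none
  let h := firstNF tail "#"
  let s := firstNF tail "L"
  h == -1 || (s != -1 && decide (s < h))

-- ===== PRECONDITION & SPEC =====
-- Pre_ excludes exactly the inputs where A raises IndexError: x+1 < -len(l) makes the first l[z] of the loop out of range.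
def Pre_check_r (l : List String) (y : Int) (x : Int) : Prop := -(l.length : Int) ≤ x + 1
instance (l : List String) (y : Int) (x : Int) : Decidable (Pre_check_r l y x) := by unfold Pre_check_r; infer_instance
def pvWitness_check_r : List String × Int × Int := (["L", "#"], 0, 0)

-- On x ≤ -2 with -len ≤ x+1 A's negative indices wrap around: after the cells right of x (all floor there) it rescans the whole
-- row from the start and returns False when the row's first non-floor cell is '#'; B searches only the cells right of x and
-- returns True, the intended answer to "is no occupied seat the nearest seat to the right".
def D_check_r (l : List String) (y : Int) (x : Int) : Prop :=
  -(l.length : Int) ≤ x + 1 ∧ x + 1 < 0 ∧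
  (l.drop (x + 1 + l.length).toNat).find? (fun s => s == "#" || s == "L") = none ∧
  l.find? (fun s => s == "#" || s == "L") = some "#"
instance (l : List String) (y : Int) (x : Int) : Decidable (D_check_r l y x) := by unfold D_check_r; infer_instance

def Spec_check_r (l : List String) (y : Int) (x : Int) (out : Bool) : Prop := ¬ D_check_r l y x → out = check_r_alt l y x
instance (l : List String) (y : Int) (x : Int) (out : Bool) : Decidable (Spec_check_r l y x out) := by unfold Spec_check_r; infer_instance

def pvDiffWitness_check_r : List String × Int × Int := (["#", "."], 0, -2)
def pvDiffWitnessOut_check_r : Bool × Bool := (false, true)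


-- ===== CLAIM (what is proved, stated in full; the proofs are below) =====
def Claim_unchanged_check_r : Prop := ∀ (l : List String) (y : Int) (x : Int), Dom_check_r l y x → Pre_check_r l y x → Spec_check_r l y x (check_r l y x)
def Claim_changed_check_r : Prop := Dom_check_r (pvDiffWitness_check_r.1) (pvDiffWitness_check_r.2.1) (pvDiffWitness_check_r.2.2) ∧ Pre_check_r (pvDiffWitness_check_r.1) (pvDiffWitness_check_r.2.1) (pvDiffWitness_check_r.2.2) ∧ D_check_r (pvDiffWitness_check_r.1) (pvDiffWitness_check_r.2.1) (pvDiffWitness_check_r.2.2) ∧ check_r (pvDiffWitness_check_r.1) (pvDiffWitness_check_r.2.1) (pvDiffWitness_check_r.2.2) = pvDiffWitnessOut_check_r.1 ∧ check_r_alt (pvDiffWitness_check_r.1) (pvDiffWitness_check_r.2.1) (pvDiffWitness_check_r.2.2) = pvDiffWitnessOut_check_r.2 ∧ pvDiffWitnessOut_check_r.1 ≠ pvDiffWitnessOut_check_r.2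
def Claim_exact_check_r : Prop := ∀ (l : List String) (y : Int) (x : Int), Dom_check_r l y x → Pre_check_r l y x → D_check_r l y x → check_r l y x ≠ check_r_alt l y x

-- ===== LEMMAS AND PROOFS =====

-- the verdict of either program, as a function of the first non-floor cell it meets
def pvRes (o : Option String) : Bool := o.elim true (fun c => c != "#")

lemma pv_firstNF_cons_self (t : List String) (c : String) : firstNF (c :: t) c = 0 := by
  rw [firstNF, if_pos (by simp), PySem.List.index?_cons_self]
  rfl

lemma pv_firstNF_cons_ne_mem (t : List String) (a c : String) (h : a ≠ c) (hm : c ∈ t) :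
    firstNF (a :: t) c = firstNF t c + 1 := by
  obtain ⟨k, hk⟩ := Option.isSome_iff_exists.mp ((PySem.List.index?_isSome_iff t c).mpr hm)
  rw [firstNF, if_pos (by simp [hm]), PySem.List.index?_cons_of_ne t h, hk,
      firstNF, if_pos (by simpa using hm), hk]
  simp

lemma pv_firstNF_cons_ne_not (t : List String) (a c : String) (h : a ≠ c) (hm : c ∉ t) :
    firstNF (a :: t) c = -1 := by
  have hn : ¬ c ∈ (a :: t) := by
    intro hc
    rcases List.mem_cons.mp hc with rfl | hc
    · exact h rfl
    · exact hm hc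
  rw [firstNF, if_neg (by simpa using hn)]

lemma pv_firstNF_not_mem (t : List String) (c : String) (hm : c ∉ t) : firstNF t c = -1 := by
  rw [firstNF, if_neg (by simpa using hm)]

lemma pv_firstNF_nonneg (t : List String) (c : String) (h : c ∈ t) : 0 ≤ firstNF t c := by
  rw [firstNF, if_pos (by simpa using h)]
  exact Int.natCast_nonneg _

lemma pv_bridge (t : List String) :
    ((firstNF t "#" == -1) || (firstNF t "L" != -1 && decide (firstNF t "L" < firstNF t "#")))
      = pvRes (t.find? (fun c => c == "#" || c == "L")) := by
  induction t with
  | nil => simp [firstNF, pvRes]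
  | cons a t ih =>
    by_cases ha : a = "#"
    · subst ha
      rw [pv_firstNF_cons_self]
      by_cases hs : "L" ∈ t
      · rw [pv_firstNF_cons_ne_mem t "#" "L" (by decide) hs]
        have h2 := pv_firstNF_nonneg t "L" hs
        simp [pvRes]
        omega
      · rw [pv_firstNF_cons_ne_not t "#" "L" (by decide) hs]
        simp [pvRes]
    · by_cases hl : a = "L"
      · subst hl
        rw [pv_firstNF_cons_self]
        by_cases hm : "#" ∈ t
        · rw [pv_firstNF_cons_ne_mem t "L" "#" (by decide) hm]
          have h1 := pv_firstNF_nonneg t "#" hm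
          simp [pvRes]
          omega
        · rw [pv_firstNF_cons_ne_not t "L" "#" (by decide) hm]
          simp [pvRes]
      · have hfind : (a :: t).find? (fun c => c == "#" || c == "L") = t.find? (fun c => c == "#" || c == "L") := by
          simp [ha, hl]
        rw [hfind, ← ih]
        by_cases hm : "#" ∈ t <;> by_cases hs : "L" ∈ t
        · rw [pv_firstNF_cons_ne_mem t a "#" ha hm, pv_firstNF_cons_ne_mem t a "L" hl hs]
          have h1 := pv_firstNF_nonneg t "#" hm
          have h2 := pv_firstNF_nonneg t "L" hs
          have e1 : ((firstNF t "#" + 1 : Int) == -1) = false := by simp; omega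
          have e2 : ((firstNF t "#" : Int) == -1) = false := by simp; omega
          have e3 : ((firstNF t "L" + 1 : Int) != -1) = true := by simp [bne]; omega
          have e4 : ((firstNF t "L" : Int) != -1) = true := by simp [bne]; omega
          have e5 : decide (firstNF t "L" + 1 < firstNF t "#" + 1) = decide (firstNF t "L" < firstNF t "#") :=
            decide_eq_decide.mpr (by omega)
          rw [e1, e2, e3, e4, e5]
        · rw [pv_firstNF_cons_ne_mem t a "#" ha hm, pv_firstNF_cons_ne_not t a "L" hl hs,
              pv_firstNF_not_mem t "L" hs]
          have h1 := pv_firstNF_nonneg t "#" hm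
          have e1 : ((firstNF t "#" + 1 : Int) == -1) = false := by simp; omega
          have e2 : ((firstNF t "#" : Int) == -1) = false := by simp; omega
          rw [e1, e2]
          simp
        · rw [pv_firstNF_cons_ne_not t a "#" ha hm, pv_firstNF_cons_ne_mem t a "L" hl hs,
              pv_firstNF_not_mem t "#" hm]
          simp
        · rw [pv_firstNF_cons_ne_not t a "#" ha hm, pv_firstNF_cons_ne_not t a "L" hl hs,
              pv_firstNF_not_mem t "#" hm, pv_firstNF_not_mem t "L" hs]

lemma pv_loop_eq_find (l : List String) (zs : List Int)
    (h : ∀ z ∈ zs, PySem.Raise.InRange l.length z) :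
    checkRLoop l zs = pvRes ((zs.filterMap (PySem.List.pyGet? l)).find? (fun s => s == "#" || s == "L")) := by
  induction zs with
  | nil => simp [checkRLoop, pvRes]
  | cons z zs ih =>
    obtain ⟨s, hs⟩ : ∃ s, PySem.List.pyGet? l z = some s := by
      cases hg : PySem.List.pyGet? l z with
      | none => exact absurd ((PySem.List.pyGet?_eq_none_iff l z).mp hg) (not_not_intro (h z (List.mem_cons_self)))
      | some s => exact ⟨s, rfl⟩
    have ih' := ih (fun z hz => h z (List.mem_cons_of_mem _ hz))
    by_cases h1 : s = "#"
    · simp [checkRLoop, hs, h1, pvRes]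
    · by_cases h2 : s = "L"
      · simp [checkRLoop, hs, h2, pvRes]
      · simp [checkRLoop, hs, h1, h2, ih']

lemma pv_fm_eq_map (l : List String) (zs : List Int)
    (h : ∀ z ∈ zs, PySem.Raise.InRange l.length z) :
    zs.filterMap (PySem.List.pyGet? l) = zs.map (fun j => PySem.List.pyGetD l j "") := by
  induction zs with
  | nil => simp
  | cons z zs ih =>
    obtain ⟨s, hs⟩ : ∃ s, PySem.List.pyGet? l z = some s := by
      cases hg : PySem.List.pyGet? l z with
      | none => exact absurd ((PySem.List.pyGet?_eq_none_iff l z).mp hg) (not_not_intro (h z (List.mem_cons_self)))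
      | some s => exact ⟨s, rfl⟩
    simp [hs, PySem.List.pyGetD, ih (fun z hz => h z (List.mem_cons_of_mem _ hz))]

lemma pv_range_inrange (l : List String) (a : Int) (ha : -(l.length : Int) ≤ a) :
    ∀ z ∈ PySem.List.pyRange a (l.length : Int), PySem.Raise.InRange l.length z := by
  intro z hz
  rw [PySem.List.mem_pyRange_one] at hz
  constructor <;> omega

lemma pv_negpart (l : List String) (k : Nat) (hk : k ≤ l.length) :
    (PySem.List.pyRange (-(k : Int)) 0).map (fun j => PySem.List.pyGetD l j "") = l.drop (l.length - k) := by
  induction k with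
  | zero => simp [PySem.List.pyRange_one_eq_nil]
  | succ k ih =>
    rw [PySem.List.pyRange_one_cons (by omega : -((k + 1 : Nat) : Int) < 0)]
    have h1 : -((k + 1 : Nat) : Int) + 1 = -(k : Int) := by push_cast; ring
    rw [List.map_cons, h1, ih (by omega)]
    rw [PySem.List.pyGetD_neg_natCast l (k + 1) "" (by omega) hk]
    have hlt : l.length - (k + 1) < l.length := by omega
    conv_rhs => rw [List.drop_eq_getElem_cons hlt]
    have htail : l.length - (k + 1) + 1 = l.length - k := by omega
    rw [htail]

lemma pv_fm_range_nonneg (l : List String) (a : Int) (h0 : 0 ≤ a) :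
    (PySem.List.pyRange a (l.length : Int)).filterMap (PySem.List.pyGet? l) = l.drop a.toNat := by
  rw [pv_fm_eq_map l _ (pv_range_inrange l a (by omega))]
  exact PySem.List.map_pyGetD_pyRange' l "" h0

lemma pv_fm_range_neg (l : List String) (a : Int) (hn : -(l.length : Int) ≤ a) (ha : a < 0) :
    (PySem.List.pyRange a (l.length : Int)).filterMap (PySem.List.pyGet? l)
      = l.drop (a + l.length).toNat ++ l := by
  rw [pv_fm_eq_map l _ (pv_range_inrange l a hn)]
  rw [PySem.List.pyRange_one_append a 0 (l.length : Int) (by omega) (by omega)]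
  rw [List.map_append, PySem.List.map_pyGetD_pyRange_zero' l ""]
  congr 1
  have hk : a = -(((-a).toNat : Int)) := by omega
  rw [hk, pv_negpart l (-a).toNat (by omega)]
  congr 1
  omega

lemma pv_alt_eq (l : List String) (x : Int) :
    check_r_alt l 0 x = pvRes ((l.drop (PySem.List.clampIdx l.length (x + 1))).find? (fun c => c == "#" || c == "L")) := by
  unfold check_r_alt
  rw [PySem.List.slice_some_none]
  exact pv_bridge _

-- check_r_alt ignores y
lemma pv_alt_y (l : List String) (y x : Int) : check_r_alt l y x = check_r_alt l 0 x := rfl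

lemma pv_unchanged (l : List String) (y x : Int) (hpre : Pre_check_r l y x) (hnd : ¬ D_check_r l y x) :
    check_r l y x = check_r_alt l y x := by
  unfold Pre_check_r at hpre
  rw [pv_alt_y]
  by_cases hbig : (l.length : Int) ≤ x + 1
  · -- empty loop on A's side, empty slice on B's side: both true
    have hA : check_r l y x = true := by
      unfold check_r
      split
      · rfl
      · rw [PySem.List.pyRange_one_eq_nil hbig]; rfl
    have hclamp : PySem.List.clampIdx l.length (x + 1) = l.length := by
      unfold PySem.List.clampIdx
      split
      · omega
      · have : (x + 1).toNat ≥ l.length := by omega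
        omega
    rw [hA, pv_alt_eq l x, hclamp]
    simp [pvRes]
  · have hguard : ¬ (x = (l.length : Int) + 1) := by omega
    unfold check_r
    rw [if_neg hguard]
    rw [pv_loop_eq_find l _ (pv_range_inrange l (x + 1) hpre)]
    rw [pv_alt_eq l x]
    by_cases hneg : x + 1 < 0
    · -- negative start: A scans drop j ++ l, B searches drop j
      have hclamp : PySem.List.clampIdx l.length (x + 1) = (x + 1 + l.length).toNat := by
        unfold PySem.List.clampIdx
        split
        · split <;> omega
        · omega
      rw [pv_fm_range_neg l (x + 1) hpre hneg, hclamp, List.find?_append]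
      cases hd : (l.drop (x + 1 + l.length).toNat).find? (fun c => c == "#" || c == "L") with
      | some c => simp
      | none =>
        simp only [Option.none_or]
        unfold D_check_r at hnd
        push Not at hnd
        have hne := hnd hpre hneg hd
        cases hl : l.find? (fun c => c == "#" || c == "L") with
        | none => simp [pvRes]
        | some c =>
          have hc := List.find?_some hl
          have : c = "#" ∨ c = "L" := by
            rcases Bool.or_eq_true_iff.mp hc with h | h
            · exact Or.inl (by simpa using h)
            · exact Or.inr (by simpa using h)
          rcases this with h | h
          · exact absurd (h ▸ hl) hne
          · simp [pvRes, h]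
    · -- nonnegative start: both look at drop (x+1)
      have hclamp : PySem.List.clampIdx l.length (x + 1) = (x + 1).toNat := by
        unfold PySem.List.clampIdx
        split
        · omega
        · omega
      rw [pv_fm_range_nonneg l (x + 1) (by omega), hclamp]

-- ===== VERDICT (by name: the statement is the Claim_ definition above) =====
theorem check_r_spec : Claim_unchanged_check_r := by
  intro l y x _ hpre
  unfold Spec_check_r
  intro hnd
  exact pv_unchanged l y x hpre hnd

theorem check_r_changed : Claim_changed_check_r := by unfold Claim_changed_check_r; decide

theorem check_r_tight : Claim_exact_check_r := by
  intro l y x _ hpre hd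
  obtain ⟨h1, h2, h3, h4⟩ := hd
  have hguard : ¬ (x = (l.length : Int) + 1) := by omega
  have hA : check_r l y x = false := by
    unfold check_r
    rw [if_neg hguard]
    rw [pv_loop_eq_find l _ (pv_range_inrange l (x + 1) h1)]
    rw [pv_fm_range_neg l (x + 1) h1 h2, List.find?_append, h3]
    simp [h4, pvRes]
  have hclamp : PySem.List.clampIdx l.length (x + 1) = (x + 1 + l.length).toNat := by
    unfold PySem.List.clampIdx
    split
    · split <;> omega
    · omega
  have hB : check_r_alt l y x = true := by
    rw [pv_alt_y, pv_alt_eq l x, hclamp, h3]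
    rfl
  rw [hA, hB]
  simp
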